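-- pv_equiv track=rewrite | github.com/sophia-jihye/target-extraction | source/utils.py | calculate_true_positive
-- ===== SOURCE A (Python) =====
-- def calculate_true_positive(predicted_list, correct_list):
--     predicted_list = [item for item in predicted_list if item != '']
--     correct_list = [item for item in correct_list if item != '']
--     tp = 0
--     for predicted_compound_target in predicted_list:
--         if predicted_compound_target in correct_list:   # 'screen' <- predicted 'screen'
--             correct_list.remove(predicted_compound_target)
--             tp += 1
--             continue
--         for correct_target in correct_list:
--             if predicted_compound_target.find(correct_target) > -1:   # 'audio' <- predicted 'audio aspects'
--                 correct_list.remove(correct_target)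
--                 tp += 1
--                 break
--     return tp
-- ===== SOURCE B (Python) =====
-- def calculate_true_positive(predicted_list, correct_list):
--     remaining = [c for c in correct_list if c != '']
--     tp = 0
--     for p in predicted_list:
--         if p == '':
--             continue
--         exact = sub = None
--         for i, c in enumerate(remaining):
--             if c == p:
--                 exact = i
--                 break
--             if sub is None and c in p:
--                 sub = i
--         i = exact if exact is not None else sub
--         if i is not None:
--             del remaining[i]
--             tp += 1
--     return tp
-- ===== Notes on version B (the rewrite author's own statement) =====
-- stated objective: simpler
-- what changed: B replaces A's two separate scans per prediction (a membership test plus remove, then a second find-loop plus remove) by one indexed pass over the remaining list that records the first exact and first substring index, then deletes at the chosen index.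
import Mathlib
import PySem

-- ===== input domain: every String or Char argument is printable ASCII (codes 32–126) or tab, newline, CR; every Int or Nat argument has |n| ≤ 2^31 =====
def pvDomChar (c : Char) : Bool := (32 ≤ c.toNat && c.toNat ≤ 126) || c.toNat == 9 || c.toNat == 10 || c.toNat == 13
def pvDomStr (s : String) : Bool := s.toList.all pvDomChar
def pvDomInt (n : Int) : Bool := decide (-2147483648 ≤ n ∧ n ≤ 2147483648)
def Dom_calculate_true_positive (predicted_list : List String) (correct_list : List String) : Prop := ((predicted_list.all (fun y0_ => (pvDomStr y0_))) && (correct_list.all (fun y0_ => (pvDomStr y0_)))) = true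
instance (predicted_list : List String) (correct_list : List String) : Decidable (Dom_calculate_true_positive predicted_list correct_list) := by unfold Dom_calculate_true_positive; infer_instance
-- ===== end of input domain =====

-- B fuses A's two per-prediction scans (membership+remove, then find-loop+remove) into one
-- indexed pass recording the first exact and first substring index, then deletes at that index (simpler).


-- ===== PORT A =====
-- inner 'for correct_target in correct_list: if predicted.find(correct_target) > -1: … break'
def pvAInner (p : String) : List String → Option String
  | [] => none
  | c :: rest => if PySem.Str.find p c > -1 then some c else pvAInner p rest

-- body of A's outer loop (state = (correct_list, tp))
def pvAStep (st : List String × Int) (p : String) : List String × Int :=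
  if st.1.contains p then
    (((PySem.List.remove? st.1 p).getD st.1), st.2 + 1)
  else
    match pvAInner p st.1 with
    | some c => (((PySem.List.remove? st.1 c).getD st.1), st.2 + 1)
    | none => st

def calculate_true_positive (predicted_list : List String) (correct_list : List String) : Int :=
  ((predicted_list.filter (fun x => x != "")).foldl pvAStep
    (correct_list.filter (fun x => x != ""), 0)).2

-- ===== PORT B =====
-- Source B's inner enumerate loop: returns (exact, sub); breaks at the first c == p
def pvBFind (p : String) (i : Nat) (sub : Option Nat) : List String → Option Nat × Option Nat
  | [] => (none, sub)
  | c :: rest =>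
    if c == p then (some i, sub)
    else if sub == none && PySem.Str.isIn c p then pvBFind p (i + 1) (some i) rest
    else pvBFind p (i + 1) sub rest

-- body of Source B's outer loop (state = (remaining, tp)); '' predictions are skipped
def pvBStep (st : List String × Int) (p : String) : List String × Int :=
  if p == "" then st
  else
    let r := pvBFind p 0 none st.1
    match (if r.1.isSome then r.1 else r.2) with
    | some i => (st.1.eraseIdx i, st.2 + 1)   -- del remaining[i]
    | none => st

def calculate_true_positive_alt (predicted_list : List String) (correct_list : List String) : Int :=
  (predicted_list.foldl pvBStep (correct_list.filter (fun x => x != ""), 0)).2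

-- ===== PRECONDITION & SPEC =====
def Spec_calculate_true_positive (predicted_list : List String) (correct_list : List String) (out : Int) : Prop := out = calculate_true_positive_alt predicted_list correct_list
instance (predicted_list : List String) (correct_list : List String) (out : Int) : Decidable (Spec_calculate_true_positive predicted_list correct_list out) := by unfold Spec_calculate_true_positive; infer_instance

-- ===== CLAIM (what is proved, stated in full; the proofs are below) =====
def Claim_equal_calculate_true_positive : Prop := ∀ (predicted_list : List String) (correct_list : List String), Dom_calculate_true_positive predicted_list correct_list → Spec_calculate_true_positive predicted_list correct_list (calculate_true_positive predicted_list correct_list)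

-- ===== LEMMAS AND PROOFS =====
-- Source A tests 'p.find(c) > -1' while Source B tests 'c in p': they agree
lemma find_gt_iff_isIn (p c : String) :
    (PySem.Str.find p c > -1) ↔ PySem.Str.isIn c p = true := by
  have h1 := PySem.Str.find_ne_neg_one_iff p c
  have h2 : -1 ≤ PySem.Str.find p c := by
    rw [PySem.Str.find_eq]; exact PySem.Chars.neg_one_le_find _ _
  rw [PySem.Str.isIn_iff_infix]
  constructor
  · intro h; exact h1.mp (by omega)
  · intro h; have := h1.mpr h; omega

-- one-step unfolding of Source B's scan
lemma pvBFind_cons (p : String) (i : Nat) (s : Option Nat) (c : String) (rest : List String) :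
    pvBFind p i s (c :: rest) =
      if c == p then (some i, s)
      else if s == none && PySem.Str.isIn c p then pvBFind p (i + 1) (some i) rest
      else pvBFind p (i + 1) s rest := rfl

-- B's scan when p is present: the exact component is the index of p's first occurrence
lemma pvBFind_fst_of_mem (p : String) (cl : List String) (hm : p ∈ cl) :
    ∀ i s, (pvBFind p i s cl).1 = (cl.idxOf? p).map (fun j => i + j) := by
  induction cl with
  | nil => cases hm
  | cons c rest ih =>
    intro i s
    by_cases hc : c = p
    · subst hc
      rw [pvBFind_cons, if_pos (by simp), List.idxOf?_cons, if_pos (by simp)]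
      rfl
    · have hm' : p ∈ rest := by
        cases hm with
        | head => exact absurd rfl hc
        | tail _ h => exact h
      have htail : ∀ s', (pvBFind p (i + 1) s' rest).1
          = ((rest.idxOf? p).map (fun x => x + 1)).map (fun j => i + j) := by
        intro s'
        rw [ih hm' (i + 1) s']
        cases rest.idxOf? p with
        | none => rfl
        | some j => simp; omega
      rw [pvBFind_cons, if_neg (by simp [hc])]
      by_cases hs : (s == none && PySem.Str.isIn c p) = true
      · rw [if_pos hs, List.idxOf?_cons, if_neg (by simp [hc])]; exact htail _
      · rw [if_neg hs, List.idxOf?_cons, if_neg (by simp [hc])]; exact htail _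

-- B's scan when p is absent and a substring index is already recorded: it is kept
lemma pvBFind_of_not_mem_some (p : String) (cl : List String) (hm : p ∉ cl) :
    ∀ i j, pvBFind p i (some j) cl = (none, some j) := by
  induction cl with
  | nil => intro i j; rfl
  | cons c rest ih =>
    intro i j
    have hc : c ≠ p := fun h => hm (h ▸ List.mem_cons_self)
    have hm' : p ∉ rest := fun h => hm (List.mem_cons_of_mem _ h)
    rw [pvBFind_cons, if_neg (by simp [hc]), if_neg (by simp), ih hm']

-- B's scan when p is absent and no substring yet: the sub component is the first substring index
lemma pvBFind_of_not_mem_none (p : String) (cl : List String) (hm : p ∉ cl) :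
    ∀ i, pvBFind p i none cl =
      (none, (cl.findIdx? (fun c => PySem.Str.isIn c p)).map (fun j => i + j)) := by
  induction cl with
  | nil => intro i; rfl
  | cons c rest ih =>
    intro i
    have hc : c ≠ p := fun h => hm (h ▸ List.mem_cons_self)
    have hm' : p ∉ rest := fun h => hm (List.mem_cons_of_mem _ h)
    rw [pvBFind_cons, if_neg (by simp [hc]), List.findIdx?_cons]
    by_cases hin : PySem.Str.isIn c p = true
    · rw [if_pos (by simp only [Bool.and_eq_true]; exact ⟨rfl, hin⟩), if_pos hin,
        pvBFind_of_not_mem_some p rest hm']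
      rfl
    · have hin' : PySem.Str.isIn c p = false := by
        cases hx : PySem.Str.isIn c p with
        | false => rfl
        | true => exact absurd hx hin
      rw [if_neg (by simp only [hin', Bool.and_false]; exact Bool.false_ne_true),
        if_neg (by simp only [hin']; exact Bool.false_ne_true), ih hm']
      cases rest.findIdx? (fun c => PySem.Str.isIn c p) with
      | none => rfl
      | some j => simp; omega

-- A's inner loop returns nothing exactly when no remaining target is a substring
lemma pvAInner_none (p : String) (cl : List String)
    (h : cl.findIdx? (fun c => PySem.Str.isIn c p) = none) : pvAInner p cl = none := by
  induction cl with
  | nil => rfl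
  | cons c rest ih =>
    rw [List.findIdx?_cons] at h
    by_cases hin : PySem.Str.isIn c p = true
    · rw [if_pos hin] at h; cases h
    · have hin' : PySem.Str.isIn c p = false := by
        cases hx : PySem.Str.isIn c p with
        | false => rfl
        | true => exact absurd hx hin
      rw [if_neg (by simp only [hin']; exact Bool.false_ne_true)] at h
      have hfind : ¬ (PySem.Str.find p c > -1) := fun hgt => hin ((find_gt_iff_isIn p c).mp hgt)
      have hrest : rest.findIdx? (fun c => PySem.Str.isIn c p) = none := by
        cases hx : rest.findIdx? (fun c => PySem.Str.isIn c p) with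
        | none => rfl
        | some j => rw [hx] at h; cases h
      simp only [pvAInner, if_neg hfind]
      exact ih hrest

-- A's inner loop finds the element at the first substring index, and erasing that
-- value equals deleting at that index
lemma pvAInner_erase_eq (p : String) (cl : List String) (j : Nat)
    (h : cl.findIdx? (fun c => PySem.Str.isIn c p) = some j) :
    ∃ c, pvAInner p cl = some c ∧ (PySem.List.remove? cl c).getD cl = cl.eraseIdx j := by
  induction cl generalizing j with
  | nil => cases h
  | cons a rest ih =>
    rw [List.findIdx?_cons] at h
    by_cases hin : PySem.Str.isIn a p = true
    · rw [if_pos hin] at h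
      cases h
      have hfind : PySem.Str.find p a > -1 := (find_gt_iff_isIn p a).mpr hin
      refine ⟨a, by simp only [pvAInner, if_pos hfind], ?_⟩
      rw [PySem.List.remove?_cons_self]
      rfl
    · have hin' : PySem.Str.isIn a p = false := by
        cases hx : PySem.Str.isIn a p with
        | false => rfl
        | true => exact absurd hx hin
      rw [if_neg (by simp only [hin']; exact Bool.false_ne_true)] at h
      have hfind : ¬ (PySem.Str.find p a > -1) := fun hgt => hin ((find_gt_iff_isIn p a).mp hgt)
      cases hx : rest.findIdx? (fun c => PySem.Str.isIn c p) with
      | none => rw [hx] at h; cases h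
      | some j' =>
        rw [hx] at h
        simp only [Option.map_some] at h
        obtain ⟨c, hc1, hc2⟩ := ih j' hx
        refine ⟨c, by simp only [pvAInner, if_neg hfind]; exact hc1, ?_⟩
        have hcin : PySem.Str.isIn c p = true := by
          -- the element pvAInner finds satisfies the substring test
          clear hc2 hx h ih
          induction rest with
          | nil => cases hc1
          | cons b r ihr =>
            simp only [pvAInner] at hc1
            by_cases hb : PySem.Str.find p b > -1
            · rw [if_pos hb] at hc1; cases hc1
              exact (find_gt_iff_isIn p c).mp hb
            · rw [if_neg hb] at hc1; exact ihr hc1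
        have hcm : c ∈ rest := by
          clear hc2 hx h ih hcin
          induction rest with
          | nil => cases hc1
          | cons b r ihr =>
            simp only [pvAInner] at hc1
            by_cases hb : PySem.Str.find p b > -1
            · rw [if_pos hb] at hc1; cases hc1; exact List.mem_cons_self
            · rw [if_neg hb] at hc1; exact List.mem_cons_of_mem _ (ihr hc1)
        have hac : a ≠ c := fun hEq => by
          rw [hEq] at hin'; rw [hcin] at hin'; cases hin'
        rw [PySem.List.remove?_cons_of_ne _ hac]
        cases hr : PySem.List.remove? rest c with
        | none => exact absurd ((PySem.List.remove?_eq_none_iff _ _).mp hr) (by simpa using hcm)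
        | some l =>
          rw [hr] at hc2
          cases h
          simp only [Option.map_some, Option.getD_some] at hc2 ⊢
          rw [List.eraseIdx_cons_succ, hc2]

-- erasing a present value = deleting at its first-occurrence index
lemma remove_mem_eq_eraseIdx (p : String) (cl : List String) (hm : p ∈ cl) (j : Nat)
    (hj : cl.idxOf? p = some j) :
    (PySem.List.remove? cl p).getD cl = cl.eraseIdx j := by
  rw [PySem.List.remove?_eq_some_erase cl p hm, Option.getD_some, List.erase_eq_eraseIdx, hj]

-- per-prediction step equality (the heart of the equivalence)
lemma step_eq (st : List String × Int) (p : String) (hp : p ≠ "") :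
    pvAStep st p = pvBStep st p := by
  obtain ⟨cl, tp⟩ := st
  have hp' : ¬ ((p == "") = true) := by simp [hp]
  by_cases hm : p ∈ cl
  · have hcont : cl.contains p = true := by simpa using hm
    obtain ⟨j, hj⟩ := Option.isSome_iff_exists.mp (List.isSome_idxOf?.mpr hm)
    have hfind := pvBFind_fst_of_mem p cl hm 0 none
    rw [hj] at hfind
    simp only [Option.map_some, Nat.zero_add] at hfind
    simp only [pvAStep, pvBStep, hcont, if_pos, if_neg hp']
    cases hE : pvBFind p 0 none cl with
    | mk e s =>
      rw [hE] at hfind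
      simp only at hfind
      subst hfind
      simp only [Option.isSome_some, if_pos]
      rw [remove_mem_eq_eraseIdx p cl hm j hj]
  · have hcont : cl.contains p = false := by simpa using hm
    simp only [pvAStep, pvBStep, hcont, Bool.false_eq_true, if_false, if_neg hp']
    rw [pvBFind_of_not_mem_none p cl hm 0]
    cases h : cl.findIdx? (fun c => PySem.Str.isIn c p) with
    | none =>
      rw [pvAInner_none p cl h]
      rfl
    | some j =>
      obtain ⟨c, hc1, hc2⟩ := pvAInner_erase_eq p cl j h
      rw [hc1]
      simp only [Option.map_some, Option.isSome_none, Bool.false_eq_true, if_false]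
      rw [hc2]
      simp

-- folding B's step over the unfiltered prediction list = folding over the filtered one
lemma foldl_B_filter (pl : List String) :
    ∀ st : List String × Int,
      pl.foldl pvBStep st = (pl.filter (fun x => x != "")).foldl pvBStep st := by
  induction pl with
  | nil => intro st; rfl
  | cons p rest ih =>
    intro st
    by_cases hp : p = ""
    · subst hp
      simp only [List.foldl_cons, List.filter_cons]
      have h0 : pvBStep st "" = st := by simp [pvBStep]
      simp [h0, ih]
    · have hne : (p != "") = true := by simp [hp]
      simp only [List.foldl_cons, List.filter_cons, hne, if_pos]
      exact ih _

lemma foldl_A_eq_B (pl : List String) :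
    ∀ st : List String × Int,
      (pl.filter (fun x => x != "")).foldl pvAStep st
        = (pl.filter (fun x => x != "")).foldl pvBStep st := by
  induction pl with
  | nil => intro st; rfl
  | cons p rest ih =>
    intro st
    by_cases hp : p = ""
    · subst hp; simp only [List.filter_cons]; simp [ih]
    · have hne : (p != "") = true := by simp [hp]
      simp only [List.filter_cons, hne, if_pos, List.foldl_cons]
      rw [step_eq st p hp]
      exact ih _

-- ===== VERDICT (by name: the statement is the Claim_ definition above) =====
theorem calculate_true_positive_spec : Claim_equal_calculate_true_positive := by
  intro pl cl _
  show _ = _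
  unfold calculate_true_positive calculate_true_positive_alt
  rw [foldl_A_eq_B, ← foldl_B_filter]
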